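-- pv_equiv track=rewrite | github.com/Fondamenti18/fondamenti-di-programmazione | students/1806064/homework04/program03.py | scorri_tag
-- ===== SOURCE A (Python) =====
-- def scorri_tag(lista,stringa,output):
--     if lista==[]:
--         return output[0]
--     if str(lista[0]) in stringa:
--         stringa=stringa.replace(str(lista[0]),"")
--         output.append(stringa)
--     scorri_tag(lista[1:],stringa,output)
--     return output[-1]
-- ===== SOURCE B (Python) =====
-- def scorri_tag(lista, stringa, output):
--     # Iterative version: same in-place appends to `output`, same return value
--     # (output[0] for empty list, output[-1] otherwise).
--     if lista == []:
--         return output[0]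
--     for elem in lista:
--         e = str(elem)
--         if e in stringa:
--             stringa = stringa.replace(e, "")
--             output.append(stringa)
--     return output[-1]
-- ===== Notes on version B (the rewrite author's own statement) =====
-- stated objective: simpler
-- what changed: Replaces the self-recursion with lista[1:] slicing by a single flat for-loop over lista carrying stringa as a local accumulator; no slices and no call stack. Mutation of the caller's output list is identical; Pre_ excludes only the inputs where both raise IndexError.
import Mathlib
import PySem

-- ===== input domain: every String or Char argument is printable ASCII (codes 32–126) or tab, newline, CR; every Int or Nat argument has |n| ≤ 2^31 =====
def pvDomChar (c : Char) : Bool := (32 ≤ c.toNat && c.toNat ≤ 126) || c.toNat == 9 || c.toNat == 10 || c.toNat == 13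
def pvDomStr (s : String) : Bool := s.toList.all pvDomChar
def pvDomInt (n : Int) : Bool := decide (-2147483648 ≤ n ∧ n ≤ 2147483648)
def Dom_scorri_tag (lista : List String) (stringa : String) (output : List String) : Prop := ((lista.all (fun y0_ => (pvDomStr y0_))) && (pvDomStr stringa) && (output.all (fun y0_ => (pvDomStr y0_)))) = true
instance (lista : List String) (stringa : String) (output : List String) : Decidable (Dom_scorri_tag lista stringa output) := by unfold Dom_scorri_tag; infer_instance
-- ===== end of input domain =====

-- B replaces A's self-recursion over lista[1:] by a flat fold over lista (simpler: no slices,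
-- no call stack). Both Pythons append to the caller's `output` list identically; the theorems
-- here are about the RETURN value. Pre_ excludes exactly the inputs where A (and B) raise IndexError.


-- ===== PORT A =====
-- A's recursion both mutates `output` and returns; the mutation is tracked by the
-- state-passing helper `scorri_tag_run` (one recursive call per element, exactly as A recurses
-- on lista[1:]), and the top-level does A's output[0] / output[-1] reads (pyGet?, none = IndexError;
-- `.getD ""` only pads the type — Pre_ excludes those inputs).
def scorri_tag_run (lista : List String) (stringa : String) (output : List String) : List String :=
  match lista with
  | [] => output
  | x :: rest =>
      if PySem.Str.isIn x stringa then
        scorri_tag_run rest (PySem.Str.replace stringa x "") (output ++ [PySem.Str.replace stringa x ""])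
      else
        scorri_tag_run rest stringa output

def scorri_tag (lista : List String) (stringa : String) (output : List String) : String :=
  match lista with
  | [] => (PySem.List.pyGet? output 0).getD ""
  | _ :: _ => (PySem.List.pyGet? (scorri_tag_run lista stringa output) (-1)).getD ""

-- ===== PORT B =====
-- B's for-loop over lista, carrying (stringa, output) as the fold state.
def scorri_tag_alt (lista : List String) (stringa : String) (output : List String) : String :=
  if lista = [] then (PySem.List.pyGet? output 0).getD ""
  else
    let st := lista.foldl
      (fun (st : String × List String) e =>
        if PySem.Str.isIn e st.1 then
          (PySem.Str.replace st.1 e "", st.2 ++ [PySem.Str.replace st.1 e ""])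
        else st)
      (stringa, output)
    (PySem.List.pyGet? st.2 (-1)).getD ""

-- ===== PRECONDITION & SPEC =====
-- Pre_ excludes exactly the inputs on which A raises IndexError (empty `output` and no element
-- of `lista` a substring of `stringa`); B raises there too.
def Pre_scorri_tag (lista : List String) (stringa : String) (output : List String) : Prop :=
  output ≠ [] ∨ ∃ e ∈ lista, PySem.Str.isIn e stringa = true
instance (lista : List String) (stringa : String) (output : List String) : Decidable (Pre_scorri_tag lista stringa output) := by unfold Pre_scorri_tag; infer_instance
def pvWitness_scorri_tag : List String × String × List String := (["a"], "abc", [])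

def Spec_scorri_tag (lista : List String) (stringa : String) (output : List String) (out : String) : Prop := out = scorri_tag_alt lista stringa output
instance (lista : List String) (stringa : String) (output : List String) (out : String) : Decidable (Spec_scorri_tag lista stringa output out) := by unfold Spec_scorri_tag; infer_instance

-- ===== CLAIM (what is proved, stated in full; the proofs are below) =====
def Claim_equal_scorri_tag : Prop := ∀ (lista : List String) (stringa : String) (output : List String), Dom_scorri_tag lista stringa output → Pre_scorri_tag lista stringa output → Spec_scorri_tag lista stringa output (scorri_tag lista stringa output)

-- ===== LEMMAS AND PROOFS =====
-- A's state-passing recursion computes the same final output list as B's fold,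
-- and it also tracks the final string.
theorem run_eq_foldl (lista : List String) (stringa : String) (output : List String) :
    scorri_tag_run lista stringa output
      = (lista.foldl
          (fun (st : String × List String) e =>
            if PySem.Str.isIn e st.1 then
              (PySem.Str.replace st.1 e "", st.2 ++ [PySem.Str.replace st.1 e ""])
            else st)
          (stringa, output)).2 := by
  induction lista generalizing stringa output with
  | nil => simp [scorri_tag_run]
  | cons x rest ih =>
    simp only [scorri_tag_run, List.foldl_cons]
    by_cases h : PySem.Str.isIn x stringa = true
    · rw [if_pos h, if_pos h]; exact ih _ _
    · rw [if_neg h, if_neg h]; exact ih _ _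

theorem scorri_tag_spec_aux (lista : List String) (stringa : String) (output : List String) :
    scorri_tag lista stringa output = scorri_tag_alt lista stringa output := by
  cases lista with
  | nil => simp [scorri_tag, scorri_tag_alt]
  | cons x rest =>
    simp only [scorri_tag, scorri_tag_alt, run_eq_foldl]
    simp

-- ===== VERDICT (by name: the statement is the Claim_ definition above) =====
theorem scorri_tag_spec : Claim_equal_scorri_tag := by
  intro lista stringa output _ _
  exact scorri_tag_spec_aux lista stringa output
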